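-- pv_equiv track=rewrite | github.com/Lawrence-Leung/PhytiumFlyers | sourcecode/masterdevice/boardtest0512/PySide6-GUI/classes/crossroadsDetector.py | processDetectionResults
-- ===== SOURCE A (Python) =====
-- def isOverLap(box1, box2):
--     """
--     判断两个bounding box是否重叠。
--     box的格式为[x1, y1, x2, y2]，其中(x1, y1)是左上角的坐标，(x2, y2)是右下角的坐标。
--     """
--     if box1[2] < box2[0] or box1[0] > box2[2] or box1[3] < box2[1] or box1[1] > box2[3]:
--         return False
--     return True
--
-- def processDetectionResults(input_data, target_class):
--     """
--     处理检测结果，保留特定class编号的对象，对于重叠的bounding boxes只保留得分最高的。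
--     """
--     boxes, scores, classes = input_data
--     filtered_boxes = []
--     filtered_scores = []
--
--     # 根据class编号筛选
--     for box, score, cls in zip(boxes, scores, classes):
--         if cls == target_class:
--             filtered_boxes.append(box)
--             filtered_scores.append(score)
--
--     # 检查并处理重叠的bounding boxes
--     final_boxes = []
--     final_scores = []
--     for i in range(len(filtered_boxes)):
--         overlap = False
--         for j in range(len(filtered_boxes)):
--             if i != j and isOverLap(filtered_boxes[i], filtered_boxes[j]):
--                 overlap = True
--                 # 保留得分更高的bounding box
--                 if filtered_scores[i] < filtered_scores[j]:
--                     break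
--         else:
--             # 如果没有发现重叠或者当前box得分最高，则加入最终结果
--             if not overlap or filtered_scores[i] >= max(filtered_scores):
--                 final_boxes.append(filtered_boxes[i])
--                 final_scores.append(filtered_scores[i])
--
--     return final_boxes, final_scores
-- ===== SOURCE B (Python) =====
-- def processDetectionResults(input_data, target_class):
--     """Sweep-line: sort the filtered boxes by left edge x1; each box is compared
--     only against later boxes in that order until their left edge passes its right
--     edge, marking both ends of every overlapping pair once; keep a box iff it is
--     unmarked (isolated) or carries the global maximum score (computed once)."""
--     boxes, scores, classes = input_data
--     flt = [(b, s) for b, s, c in zip(boxes, scores, classes) if c == target_class]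
--     n = len(flt)
--     if n < 2:
--         return [b for b, _ in flt], [s for _, s in flt]
--     m = max(s for _, s in flt)
--     order = sorted(range(n), key=lambda k: flt[k][0][0])
--     marked = [False] * n
--     for a in range(n):
--         i = order[a]
--         bi = flt[i][0]
--         for b in range(a + 1, n):
--             j = order[b]
--             bj = flt[j][0]
--             if bi[2] < bj[0]:
--                 break
--             if not (bi[2] < bj[0] or bi[0] > bj[2] or bi[3] < bj[1] or bi[1] > bj[3]):
--                 marked[i] = True
--                 marked[j] = True
--     keep = [k for k in range(n) if not marked[k] or flt[k][1] >= m]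
--     return [flt[k][0] for k in keep], [flt[k][1] for k in keep]
-- ===== Notes on version B (the rewrite author's own statement) =====
-- stated objective: alternative
-- what changed: B replaces A's all-pairs overlap scan (with break/for-else and per-box max recomputation) by a sweep line: indices sorted once by left edge x1, each box compared only with later boxes in that order until their left edge passes its right edge, marking both ends of every overlapping pair once; kept = unmarked or global-max score (max computed once).
import Mathlib
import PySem

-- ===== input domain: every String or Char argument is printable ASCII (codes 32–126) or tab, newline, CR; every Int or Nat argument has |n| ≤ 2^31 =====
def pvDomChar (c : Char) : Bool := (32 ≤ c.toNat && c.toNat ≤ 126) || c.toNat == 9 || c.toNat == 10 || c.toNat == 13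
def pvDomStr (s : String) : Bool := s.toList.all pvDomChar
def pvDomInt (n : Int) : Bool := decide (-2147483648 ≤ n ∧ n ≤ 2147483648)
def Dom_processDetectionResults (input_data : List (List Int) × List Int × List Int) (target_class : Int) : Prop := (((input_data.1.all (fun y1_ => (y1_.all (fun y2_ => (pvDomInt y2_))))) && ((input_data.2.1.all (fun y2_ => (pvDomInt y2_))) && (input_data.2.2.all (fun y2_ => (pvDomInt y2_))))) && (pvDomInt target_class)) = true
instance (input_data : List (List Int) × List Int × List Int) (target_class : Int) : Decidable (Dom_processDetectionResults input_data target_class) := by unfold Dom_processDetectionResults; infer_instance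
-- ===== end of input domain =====

-- B replaces A's all-pairs scan by a sweep line: boxes sorted by left edge, each compared
-- only with later boxes until their left edge passes its right edge, marking both ends of
-- every overlapping pair; kept = unmarked or global-max score (objective: alternative).

-- ===== PORT A =====
-- shared module helper isOverLap; indexing box[0..3] is exact under Pre_ (all compared boxes have ≥ 4 coords)
def pvIsOverLap (box1 box2 : List Int) : Bool :=
  if (PySem.List.pyGet? box1 2).getD 0 < (PySem.List.pyGet? box2 0).getD 0
     || (PySem.List.pyGet? box1 0).getD 0 > (PySem.List.pyGet? box2 2).getD 0
     || (PySem.List.pyGet? box1 3).getD 0 < (PySem.List.pyGet? box2 1).getD 0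
     || (PySem.List.pyGet? box1 1).getD 0 > (PySem.List.pyGet? box2 3).getD 0
  then false else true

-- inner 'for j in range(n)' with break (none) / for-else (some overlap); indices from range are in bounds
def pvInnerA (fb : List (List Int)) (fs : List Int) (i : Nat) : List Nat → Bool → Option Bool
  | [], overlap => some overlap
  | j :: js, overlap =>
    if i ≠ j ∧ pvIsOverLap (fb.getD i []) (fb.getD j []) = true then
      if fs.getD i 0 < fs.getD j 0 then none
      else pvInnerA fb fs i js true
    else pvInnerA fb fs i js overlap

-- outer 'for i in range(n)' accumulating final_boxes, final_scores
def pvOuterA (fb : List (List Int)) (fs : List Int) : List Nat → List (List Int) × List Int → List (List Int) × List Int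
  | [], acc => acc
  | i :: is, acc =>
    match pvInnerA fb fs i (List.range fb.length) false with
    | none => pvOuterA fb fs is acc
    | some overlap =>
      if overlap = false ∨ (PySem.List.max? fs (fun y => y)).getD 0 ≤ fs.getD i 0 then
        pvOuterA fb fs is (acc.1 ++ [fb.getD i []], acc.2 ++ [fs.getD i 0])
      else pvOuterA fb fs is acc

def processDetectionResults (input_data : List (List Int) × List Int × List Int) (target_class : Int) : List (List Int) × List Int :=
  let boxes := input_data.1
  let scores := input_data.2.1
  let classes := input_data.2.2
  let filtered := (boxes.zip (scores.zip classes)).foldl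
    (fun acc x => if x.2.2 = target_class then (acc.1 ++ [x.1], acc.2 ++ [x.2.1]) else acc) ([], [])
  pvOuterA filtered.1 filtered.2 (List.range filtered.1.length) ([], [])

-- ===== PORT B =====
-- inner sweep: compare box i with the later boxes (in x1 order) until their left edge
-- passes i's right edge (break), marking both ends of each overlapping pair
def pvSweepInner (flt : List (List Int × Int)) (i : Nat) : List Nat → List Bool → List Bool
  | [], marked => marked
  | j :: js, marked =>
    if (PySem.List.pyGet? (flt.getD i ([], 0)).1 2).getD 0 < (PySem.List.pyGet? (flt.getD j ([], 0)).1 0).getD 0 then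
      marked
    else if pvIsOverLap (flt.getD i ([], 0)).1 (flt.getD j ([], 0)).1 then
      pvSweepInner flt i js ((marked.set i true).set j true)
    else pvSweepInner flt i js marked

-- outer sweep over the x1-sorted index order
def pvSweep (flt : List (List Int × Int)) : List Nat → List Bool → List Bool
  | [], marked => marked
  | i :: rest, marked => pvSweep flt rest (pvSweepInner flt i rest marked)

def processDetectionResults_alt (input_data : List (List Int) × List Int × List Int) (target_class : Int) : List (List Int) × List Int :=
  let boxes := input_data.1
  let scores := input_data.2.1
  let classes := input_data.2.2
  let flt := ((boxes.zip (scores.zip classes)).filter (fun x => x.2.2 == target_class)).map (fun x => (x.1, x.2.1))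
  let n := flt.length
  if n < 2 then (flt.map (fun p => p.1), flt.map (fun p => p.2))
  else
    let m := (PySem.List.max? (flt.map (fun p => p.2)) (fun y => y)).getD 0
    let order := PySem.List.sorted (List.range n) (fun k => (PySem.List.pyGet? (flt.getD k ([], 0)).1 0).getD 0) false
    let marked := pvSweep flt order (List.replicate n false)
    let keep := (List.range n).filter (fun k => !(marked.getD k false) || m ≤ (flt.getD k ([], 0)).2)
    (keep.map (fun k => (flt.getD k ([], 0)).1), keep.map (fun k => (flt.getD k ([], 0)).2))

-- ===== PRECONDITION & SPEC =====
-- Pre_ excludes inputs on which box[0..3] indexing can raise IndexError (in A's isOverLap or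
-- B's sort key / sweep): it demands every target-class box (paired by zip) to have at least 4
-- coordinates whenever two or more target-class boxes exist; slightly narrower than the exact
-- raise set because the boolean 'or' short-circuits (see claim cites).
def Pre_processDetectionResults (input_data : List (List Int) × List Int × List Int) (target_class : Int) : Prop :=
  2 ≤ ((input_data.1.zip (input_data.2.1.zip input_data.2.2)).filter (fun x => x.2.2 == target_class)).length →
  ∀ x ∈ input_data.1.zip (input_data.2.1.zip input_data.2.2), x.2.2 = target_class → 4 ≤ x.1.length
instance (input_data : List (List Int) × List Int × List Int) (target_class : Int) : Decidable (Pre_processDetectionResults input_data target_class) := by unfold Pre_processDetectionResults; infer_instance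

def pvWitness_processDetectionResults : (List (List Int) × List Int × List Int) × Int :=
  (([[0, 0, 2, 2], [1, 1, 3, 3]], [5, 7], [1, 1]), 1)

def Spec_processDetectionResults (input_data : List (List Int) × List Int × List Int) (target_class : Int) (out : List (List Int) × List Int) : Prop := out = processDetectionResults_alt input_data target_class
instance (input_data : List (List Int) × List Int × List Int) (target_class : Int) (out : List (List Int) × List Int) : Decidable (Spec_processDetectionResults input_data target_class out) := by unfold Spec_processDetectionResults; infer_instance

-- ===== CLAIM (what is proved, stated in full; the proofs are below) =====
def Claim_equal_processDetectionResults : Prop := ∀ (input_data : List (List Int) × List Int × List Int) (target_class : Int), Dom_processDetectionResults input_data target_class → Pre_processDetectionResults input_data target_class → Spec_processDetectionResults input_data target_class (processDetectionResults input_data target_class)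

-- ===== LEMMAS AND PROOFS =====

-- abbreviations for the proofs (box / score / edges of the k-th filtered pair)
def pvBox (flt : List (List Int × Int)) (k : Nat) : List Int := (flt.getD k ([], 0)).1
def pvX1 (flt : List (List Int × Int)) (k : Nat) : Int := (PySem.List.pyGet? (pvBox flt k) 0).getD 0
def pvX2 (flt : List (List Int × Int)) (k : Nat) : Int := (PySem.List.pyGet? (pvBox flt k) 2).getD 0
def pvOv (flt : List (List Int × Int)) (i j : Nat) : Bool := pvIsOverLap (pvBox flt i) (pvBox flt j)

theorem pvIsOverLap_symm (b1 b2 : List Int) : pvIsOverLap b1 b2 = pvIsOverLap b2 b1 := by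
  unfold pvIsOverLap
  split_ifs with h1 h2 h2 <;> try rfl
  · simp only [Bool.or_eq_true, decide_eq_true_eq] at h1 h2; omega
  · simp only [Bool.or_eq_true, decide_eq_true_eq] at h1 h2; omega

theorem pvOv_false_of_lt (flt : List (List Int × Int)) (i j : Nat) (h : pvX2 flt i < pvX1 flt j) :
    pvOv flt i j = false := by
  unfold pvOv pvIsOverLap
  rw [if_pos]
  simp only [Bool.or_eq_true, decide_eq_true_eq]
  exact Or.inl (Or.inl (Or.inl h))

theorem pvSweepInner_length (flt : List (List Int × Int)) (i : Nat) (js : List Nat) (m : List Bool) :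
    (pvSweepInner flt i js m).length = m.length := by
  induction js generalizing m with
  | nil => rfl
  | cons j js ih =>
    unfold pvSweepInner
    split_ifs with h1 h2
    · rfl
    · rw [ih]; simp
    · exact ih m

theorem getD_set_true (m : List Bool) (i k : Nat) (hi : i < m.length) :
    (m.set i true).getD k false = if k = i then true else m.getD k false := by
  by_cases hk : k = i
  · subst hk; simp [List.getD_eq_getElem?_getD, hi]
  · have hik : i ≠ k := fun h => hk h.symm
    simp [List.getD_eq_getElem?_getD, hik, hk]

-- the inner sweep marks exactly the pairs (i, j) with j in js that truly overlap,
-- provided js is x1-nondecreasing (so the break only skips non-overlapping boxes)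
theorem pvSweepInner_getD (flt : List (List Int × Int)) (i : Nat) (js : List Nat) (m : List Bool)
    (hi : i < m.length) (hjs : ∀ j ∈ js, j < m.length)
    (hsort : js.Pairwise (fun a b => pvX1 flt a ≤ pvX1 flt b)) (k : Nat) :
    (pvSweepInner flt i js m).getD k false
      = (m.getD k false || js.any (fun j => pvOv flt i j && (decide (k = i) || decide (k = j)))) := by
  induction js generalizing m with
  | nil => simp [pvSweepInner]
  | cons j js ih =>
    have hj : j < m.length := hjs j (List.mem_cons_self ..)
    have hjs' : ∀ j' ∈ js, j' < m.length := fun j' h => hjs j' (List.mem_cons_of_mem _ h)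
    have hhead : ∀ j' ∈ js, pvX1 flt j ≤ pvX1 flt j' := fun j' h => (List.pairwise_cons.mp hsort).1 j' h
    have htail : js.Pairwise (fun a b => pvX1 flt a ≤ pvX1 flt b) := (List.pairwise_cons.mp hsort).2
    unfold pvSweepInner
    split_ifs with h1 h2
    · -- break: no box from j :: js overlaps i
      have hall : ∀ j' ∈ j :: js, pvOv flt i j' = false := by
        intro j' hj'
        rcases List.mem_cons.mp hj' with h | h
        · exact h ▸ pvOv_false_of_lt flt i j h1
        · exact pvOv_false_of_lt flt i j' (lt_of_lt_of_le h1 (hhead j' h))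
      have : ((j :: js).any (fun j' => pvOv flt i j' && (decide (k = i) || decide (k = j')))) = false := by
        rw [List.any_eq_false]
        intro j' hj'
        rw [hall j' hj']
        simp
      rw [this, Bool.or_false]
    · -- overlap: mark both i and j, continue
      have hov : pvOv flt i j = true := h2
      rw [ih ((m.set i true).set j true) (by simp [hi]) (by intro j' h; simp [hjs' j' h]) htail]
      rw [getD_set_true _ j k (by simp [hj]), getD_set_true _ i k hi]
      simp only [List.any_cons, hov, Bool.true_and]
      by_cases hkj : k = j
      · simp [hkj]
      · by_cases hki : k = i <;> simp [hki, hkj]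
    · -- no overlap
      have hov : pvOv flt i j = false := Bool.eq_false_iff.mpr h2
      rw [ih m hi hjs' htail]
      simp [List.any_cons, hov]

-- proof-only helper: the pairs examined by the triangular sweep that mark index k
def pvPairHit (flt : List (List Int × Int)) (k : Nat) : List Nat → Bool
  | [] => false
  | i :: rest => rest.any (fun j => pvOv flt i j && (decide (k = i) || decide (k = j))) || pvPairHit flt k rest

theorem pvSweep_getD (flt : List (List Int × Int)) (os : List Nat) (m : List Bool)
    (hos : ∀ i ∈ os, i < m.length)
    (hsort : os.Pairwise (fun a b => pvX1 flt a ≤ pvX1 flt b)) (k : Nat) :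
    (pvSweep flt os m).getD k false = (m.getD k false || pvPairHit flt k os) := by
  induction os generalizing m with
  | nil => simp [pvSweep, pvPairHit]
  | cons i rest ih =>
    have hi : i < m.length := hos i (List.mem_cons_self ..)
    have hrest : ∀ j ∈ rest, j < m.length := fun j h => hos j (List.mem_cons_of_mem _ h)
    have htail := (List.pairwise_cons.mp hsort).2
    unfold pvSweep
    rw [ih _ (by intro j h; rw [pvSweepInner_length]; exact hrest j h) htail]
    rw [pvSweepInner_getD flt i rest m hi hrest htail k]
    simp [pvPairHit, Bool.or_assoc]

theorem pvPairHit_true_elim (flt : List (List Int × Int)) (k : Nat) (os : List Nat)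
    (hnd : os.Nodup) (h : pvPairHit flt k os = true) :
    ∃ j ∈ os, j ≠ k ∧ pvOv flt k j = true := by
  induction os with
  | nil => simp [pvPairHit] at h
  | cons i rest ih =>
    unfold pvPairHit at h
    rcases Bool.or_eq_true_iff.mp h with h | h
    · obtain ⟨j, hjmem, hj⟩ := List.any_eq_true.mp h
      simp only [Bool.and_eq_true, Bool.or_eq_true, decide_eq_true_eq] at hj
      have hij : i ≠ j := fun he => (List.nodup_cons.mp hnd).1 (he ▸ hjmem)
      rcases hj.2 with hk | hk
      · exact ⟨j, List.mem_cons_of_mem _ hjmem, fun he => hij (hk ▸ he.symm ▸ rfl), hk ▸ hj.1⟩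
      · refine ⟨i, List.mem_cons_self .., fun he => hij (by omega), ?_⟩
        rw [hk]; unfold pvOv; rw [pvIsOverLap_symm]; exact hj.1
    · obtain ⟨j, hjmem, hj⟩ := ih (List.nodup_cons.mp hnd).2 h
      exact ⟨j, List.mem_cons_of_mem _ hjmem, hj⟩

theorem pvPairHit_true_intro (flt : List (List Int × Int)) (k : Nat) (os : List Nat)
    (u v : Nat) (hu : u ∈ os) (hv : v ∈ os) (huv : u ≠ v) (hov : pvOv flt u v = true)
    (hk : k = u ∨ k = v) : pvPairHit flt k os = true := by
  induction os with
  | nil => simp at hu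
  | cons i rest ih =>
    unfold pvPairHit
    rcases List.mem_cons.mp hu with hiu | hu'
    · have hv' : v ∈ rest := by
        rcases List.mem_cons.mp hv with hiv | h
        · exact absurd (hiv ▸ hiu : u = v) huv
        · exact h
      apply Bool.or_eq_true_iff.mpr; left
      refine List.any_eq_true.mpr ⟨v, hv', ?_⟩
      subst hiu
      simp only [Bool.and_eq_true, Bool.or_eq_true, decide_eq_true_eq]
      exact ⟨hov, by tauto⟩
    · rcases List.mem_cons.mp hv with hiv | hv'
      · apply Bool.or_eq_true_iff.mpr; left
        refine List.any_eq_true.mpr ⟨u, hu', ?_⟩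
        subst hiv
        simp only [Bool.and_eq_true, Bool.or_eq_true, decide_eq_true_eq]
        constructor
        · unfold pvOv; rw [pvIsOverLap_symm]; exact hov
        · tauto
      · exact Bool.or_eq_true_iff.mpr (Or.inr (ih hu' hv'))

-- A's filtering fold builds the fst/snd projections of B's filtered pair list
theorem pvFoldA_eq (t : Int) (z : List (List Int × Int × Int)) (ab : List (List Int)) (as_ : List Int) :
    z.foldl (fun acc x => if x.2.2 = t then (acc.1 ++ [x.1], acc.2 ++ [x.2.1]) else acc) (ab, as_)
      = (ab ++ ((z.filter (fun x => x.2.2 == t)).map (fun x => (x.1, x.2.1))).map (fun p => p.1),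
         as_ ++ ((z.filter (fun x => x.2.2 == t)).map (fun x => (x.1, x.2.1))).map (fun p => p.2)) := by
  induction z generalizing ab as_ with
  | nil => simp
  | cons hd tl ih =>
    by_cases h : hd.2.2 = t
    · simp [List.foldl_cons, h, ih]
    · simp [List.foldl_cons, h, ih]

-- characterisation of A's inner break/else loop
theorem pvInnerA_eq (fb : List (List Int)) (fs : List Int) (i : Nat) (js : List Nat) (ov : Bool) :
    pvInnerA fb fs i js ov =
      if js.any (fun j => decide (i ≠ j) && pvIsOverLap (fb.getD i []) (fb.getD j [])
                          && decide (fs.getD i 0 < fs.getD j 0)) then none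
      else some (ov || js.any (fun j => decide (i ≠ j) && pvIsOverLap (fb.getD i []) (fb.getD j []))) := by
  induction js generalizing ov with
  | nil => simp [pvInnerA]
  | cons j js ih =>
    by_cases h1 : i ≠ j ∧ pvIsOverLap (fb.getD i []) (fb.getD j []) = true
    · by_cases h2 : fs.getD i 0 < fs.getD j 0
      · have hcond : ((j :: js).any (fun j' => decide (i ≠ j') && pvIsOverLap (fb.getD i []) (fb.getD j' [])
            && decide (fs.getD i 0 < fs.getD j' 0))) = true := by
          simp only [List.any_cons, Bool.or_eq_true, Bool.and_eq_true, decide_eq_true_eq]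
          exact Or.inl ⟨⟨h1.1, h1.2⟩, h2⟩
        simp only [pvInnerA, if_pos h1, if_pos h2, hcond, if_true]
      · have hb : (decide (i ≠ j) && pvIsOverLap (fb.getD i []) (fb.getD j [])
            && decide (fs.getD i 0 < fs.getD j 0)) = false :=
          Bool.and_eq_false_iff.mpr (Or.inr (decide_eq_false h2))
        have ho : (decide (i ≠ j) && pvIsOverLap (fb.getD i []) (fb.getD j [])) = true := by
          rw [decide_eq_true h1.1, h1.2]; rfl
        simp only [pvInnerA, if_pos h1, if_neg h2, ih, List.any_cons, hb]
        simp only [ho, Bool.false_or, Bool.true_or, Bool.or_true]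
    · have ho : (decide (i ≠ j) && pvIsOverLap (fb.getD i []) (fb.getD j [])) = false := by
        by_cases hij : i = j
        · simp [hij]
        · have hfalse : pvIsOverLap (fb.getD i []) (fb.getD j []) = false := by
            cases h : pvIsOverLap (fb.getD i []) (fb.getD j []) with
            | false => rfl
            | true => exact absurd ⟨hij, h⟩ h1
          rw [hfalse]
          simp
      have hb : (decide (i ≠ j) && pvIsOverLap (fb.getD i []) (fb.getD j [])
          && decide (fs.getD i 0 < fs.getD j 0)) = false := by
        rw [ho]
        simp
      simp only [pvInnerA, if_neg h1, ih, List.any_cons, hb]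
      simp only [ho, Bool.false_or]

theorem getD_le_max (fs : List Int) (j : Nat) (hj : j < fs.length) :
    fs.getD j 0 ≤ (PySem.List.max? fs (fun y => y)).getD 0 := by
  have hne : fs ≠ [] := by intro h; subst h; simp at hj
  obtain ⟨m, hm⟩ : ∃ m, PySem.List.max? fs (fun y => y) = some m := by
    cases h : PySem.List.max? fs (fun y => y) with
    | none => exact absurd ((PySem.List.max?_eq_none_iff fs (fun y => y)).mp h) hne
    | some m => exact ⟨m, rfl⟩
  have hmem : fs.getD j 0 ∈ fs := by
    rw [List.getD_eq_getElem fs 0 hj]; exact List.getElem_mem hj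
  have := PySem.List.max?_isMax hm _ hmem
  simpa [hm] using this

-- A's outer loop appends exactly the boxes satisfying the max-or-isolated predicate
theorem pvOuterA_eq (fb : List (List Int)) (fs : List Int) (hlen : fb.length = fs.length)
    (is : List Nat) (acc : List (List Int) × List Int) (his : ∀ k ∈ is, k < fb.length) :
    pvOuterA fb fs is acc =
      (acc.1 ++ (is.filter (fun k =>
          (PySem.List.max? fs (fun y => y)).getD 0 ≤ fs.getD k 0
          || !((List.range fb.length).any (fun j => j ≠ k && pvIsOverLap (fb.getD k []) (fb.getD j []))))).map (fun k => fb.getD k []),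
       acc.2 ++ (is.filter (fun k =>
          (PySem.List.max? fs (fun y => y)).getD 0 ≤ fs.getD k 0
          || !((List.range fb.length).any (fun j => j ≠ k && pvIsOverLap (fb.getD k []) (fb.getD j []))))).map (fun k => fs.getD k 0)) := by
  induction is generalizing acc with
  | nil => simp [pvOuterA]
  | cons k is ih =>
    have hk : k < fb.length := his k (List.mem_cons_self ..)
    have his' : ∀ k' ∈ is, k' < fb.length := fun k' h => his k' (List.mem_cons_of_mem _ h)
    have hany : ((List.range fb.length).any (fun j => decide (k ≠ j) && pvIsOverLap (fb.getD k []) (fb.getD j [])))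
        = ((List.range fb.length).any (fun j => decide (j ≠ k) && pvIsOverLap (fb.getD k []) (fb.getD j []))) := by
      congr 1; funext j; congr 1; simp [ne_comm]
    by_cases hbrk : ((List.range fb.length).any (fun j => decide (k ≠ j) && pvIsOverLap (fb.getD k []) (fb.getD j [])
                          && decide (fs.getD k 0 < fs.getD j 0))) = true
    · -- break: k is dropped by A; show the predicate is false at k
      obtain ⟨j, hjmem, hj⟩ := List.any_eq_true.mp hbrk
      simp only [Bool.and_eq_true, decide_eq_true_eq] at hj
      have hjlt : j < fb.length := List.mem_range.mp hjmem
      have hmax : ¬ ((PySem.List.max? fs (fun y => y)).getD 0 ≤ fs.getD k 0) := by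
        have := getD_le_max fs j (hlen ▸ hjlt)
        omega
      have hov : ((List.range fb.length).any (fun j => decide (j ≠ k) && pvIsOverLap (fb.getD k []) (fb.getD j []))) = true := by
        refine List.any_eq_true.mpr ⟨j, hjmem, ?_⟩
        simp only [Bool.and_eq_true, decide_eq_true_eq]
        exact ⟨fun h => hj.1.1 h.symm, hj.1.2⟩
      have hpred : (decide ((PySem.List.max? fs (fun y => y)).getD 0 ≤ fs.getD k 0)
          || !((List.range fb.length).any (fun j => decide (j ≠ k) && pvIsOverLap (fb.getD k []) (fb.getD j [])))) = false := by
        rw [hov, decide_eq_false hmax]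
        rfl
      simp only [pvOuterA, pvInnerA_eq, hbrk, if_true, List.filter_cons, hpred,
        Bool.false_eq_true, if_false]
      exact ih acc his'
    · -- no break: A's keep condition coincides with the predicate at k
      have hbrk' : ((List.range fb.length).any (fun j => decide (k ≠ j) && pvIsOverLap (fb.getD k []) (fb.getD j [])
                          && decide (fs.getD k 0 < fs.getD j 0))) = false := Bool.eq_false_iff.mpr hbrk
      simp only [pvOuterA, pvInnerA_eq, hbrk', Bool.false_eq_true, if_false, Bool.false_or,
        List.filter_cons]
      by_cases hpred : (decide ((PySem.List.max? fs (fun y => y)).getD 0 ≤ fs.getD k 0)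
          || !((List.range fb.length).any (fun j => decide (j ≠ k) && pvIsOverLap (fb.getD k []) (fb.getD j [])))) = true
      · have hcond : (((List.range fb.length).any (fun j => decide (k ≠ j) && pvIsOverLap (fb.getD k []) (fb.getD j []))) = false
            ∨ (PySem.List.max? fs (fun y => y)).getD 0 ≤ fs.getD k 0) := by
          rcases Bool.or_eq_true_iff.mp hpred with h | h
          · right; exact of_decide_eq_true h
          · left; rw [hany]; simpa using h
        rw [if_pos hcond, hpred, if_pos rfl, ih _ his']
        simp
      · have hcond : ¬ (((List.range fb.length).any (fun j => decide (k ≠ j) && pvIsOverLap (fb.getD k []) (fb.getD j []))) = false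
            ∨ (PySem.List.max? fs (fun y => y)).getD 0 ≤ fs.getD k 0) := by
          simp only [Bool.or_eq_true_iff, not_or] at hpred ⊢
          obtain ⟨h1, h2⟩ := hpred
          constructor
          · rw [hany]
            simp only [Bool.not_eq_true', Bool.not_eq_false] at h2 ⊢
            simpa using h2
          · exact fun h => h1 (decide_eq_true h)
        rw [if_neg hcond, Bool.eq_false_iff.mpr hpred, ih _ his']
        simp

theorem getD_map_fst (l : List (List Int × Int)) (k : Nat) :
    (l.map (fun p => p.1)).getD k [] = (l.getD k ([], 0)).1 := by
  simp only [List.getD_eq_getElem?_getD, List.getElem?_map]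
  cases l[k]? <;> simp

theorem getD_map_snd (l : List (List Int × Int)) (k : Nat) :
    (l.map (fun p => p.2)).getD k 0 = (l.getD k ([], 0)).2 := by
  simp only [List.getD_eq_getElem?_getD, List.getElem?_map]
  cases l[k]? <;> simp

-- the marked array computed by the sweep reads back exactly "overlaps some other box"
theorem pvMarked_getD (flt : List (List Int × Int)) (k : Nat) (hk : k < flt.length) :
    (pvSweep flt (PySem.List.sorted (List.range flt.length) (fun k => (PySem.List.pyGet? (flt.getD k ([], 0)).1 0).getD 0) false)
        (List.replicate flt.length false)).getD k false
      = (List.range flt.length).any (fun j => j ≠ k && pvOv flt k j) := by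
  set os := PySem.List.sorted (List.range flt.length) (fun k => (PySem.List.pyGet? (flt.getD k ([], 0)).1 0).getD 0) false with hos
  have hperm : os.Perm (List.range flt.length) := PySem.List.sorted_perm _ _ _
  have hmem : ∀ i, i ∈ os ↔ i < flt.length := by
    intro i; rw [hperm.mem_iff, List.mem_range]
  have hnd : os.Nodup := hperm.nodup_iff.mpr (List.nodup_range)
  have hsort : os.Pairwise (fun a b => pvX1 flt a ≤ pvX1 flt b) := by
    have := PySem.List.sorted_pairwise (List.range flt.length) (fun k => (PySem.List.pyGet? (flt.getD k ([], 0)).1 0).getD 0)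
    exact this
  rw [pvSweep_getD flt os _ (by intro i h; rw [List.length_replicate]; exact (hmem i).mp h) hsort]
  have hrep : (List.replicate flt.length false).getD k false = false := by
    simp [List.getD_eq_getElem?_getD, hk]
  rw [hrep, Bool.false_or]
  cases hhit : pvPairHit flt k os with
  | true =>
    obtain ⟨j, hjmem, hjk, hov⟩ := pvPairHit_true_elim flt k os hnd hhit
    symm
    refine List.any_eq_true.mpr ⟨j, List.mem_range.mpr ((hmem j).mp hjmem), ?_⟩
    simp only [Bool.and_eq_true, decide_eq_true_eq]
    exact ⟨hjk, hov⟩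
  | false =>
    symm
    rw [List.any_eq_false]
    intro j hjmem
    by_contra hne
    simp only [Bool.and_eq_true, decide_eq_true_eq] at hne
    have : pvPairHit flt k os = true := by
      refine pvPairHit_true_intro flt k os k j ((hmem k).mpr hk)
        ((hmem j).mpr (List.mem_range.mp hjmem)) (fun h => hne.1 h.symm) hne.2 (Or.inl rfl)
    rw [hhit] at this; cases this

theorem map_getD_range_fst (l : List (List Int × Int)) :
    (List.range l.length).map (fun k => (l.getD k ([], 0)).1) = l.map (fun p => p.1) := by
  apply List.ext_getElem
  · simp
  · intro k h1 h2
    have hk : k < l.length := by simpa using h2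
    simp [List.getD_eq_getElem?_getD, List.getElem?_eq_getElem hk]

theorem map_getD_range_snd (l : List (List Int × Int)) :
    (List.range l.length).map (fun k => (l.getD k ([], 0)).2) = l.map (fun p => p.2) := by
  apply List.ext_getElem
  · simp
  · intro k h1 h2
    have hk : k < l.length := by simpa using h2
    simp [List.getD_eq_getElem?_getD, List.getElem?_eq_getElem hk]

-- ===== VERDICT (by name: the statement is the Claim_ definition above) =====
theorem processDetectionResults_spec : Claim_equal_processDetectionResults := by
  intro input_data target_class _hdom _hpre
  unfold Spec_processDetectionResults processDetectionResults processDetectionResults_alt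
  dsimp only
  set z := input_data.1.zip (input_data.2.1.zip input_data.2.2) with hz
  set flt := (z.filter (fun x => x.2.2 == target_class)).map (fun x => (x.1, x.2.1)) with hflt
  rw [pvFoldA_eq]
  simp only [List.nil_append]
  set fb := flt.map (fun p => p.1) with hfb
  set fs := flt.map (fun p => p.2) with hfs
  have hlen : fb.length = fs.length := by simp [hfb, hfs]
  have hlenf : fb.length = flt.length := by simp [hfb]
  rw [pvOuterA_eq fb fs hlen (List.range fb.length) ([], []) (fun k h => List.mem_range.mp h)]
  rw [hlenf]
  -- A's result as a filter over range flt.length with the max-or-isolated predicate, on flt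
  have hApred : ∀ k ∈ List.range flt.length,
      (decide ((PySem.List.max? fs (fun y => y)).getD 0 ≤ fs.getD k 0)
        || !((List.range flt.length).any (fun j => decide (j ≠ k) && pvIsOverLap (fb.getD k []) (fb.getD j []))))
      = (decide ((PySem.List.max? fs (fun y => y)).getD 0 ≤ (flt.getD k ([], 0)).2)
        || !((List.range flt.length).any (fun j => decide (j ≠ k) && pvOv flt k j))) := by
    intro k _
    rw [hfs, getD_map_snd flt k]
    congr 2
    congr 1
    funext j
    unfold pvOv pvBox
    rw [hfb, getD_map_fst flt k, getD_map_fst flt j]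
  rw [List.filter_congr hApred]
  by_cases hsmall : flt.length < 2
  · -- fewer than two filtered boxes: nothing can overlap, both sides keep everything
    rw [if_pos hsmall]
    have hall : ∀ k ∈ List.range flt.length,
        (decide ((PySem.List.max? fs (fun y => y)).getD 0 ≤ (flt.getD k ([], 0)).2)
          || !((List.range flt.length).any (fun j => decide (j ≠ k) && pvOv flt k j))) = true := by
      intro k hkmem
      have hk := List.mem_range.mp hkmem
      have : ((List.range flt.length).any (fun j => decide (j ≠ k) && pvOv flt k j)) = false := by
        rw [List.any_eq_false]
        intro j hj
        have hj' := List.mem_range.mp hj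
        have : j = k := by omega
        simp [this]
      rw [this]
      simp
    rw [List.filter_eq_self.mpr hall]
    rw [List.map_congr_left (fun k (_ : k ∈ List.range flt.length) => getD_map_fst flt k),
        List.map_congr_left (fun k (_ : k ∈ List.range flt.length) => getD_map_snd flt k),
        map_getD_range_fst, map_getD_range_snd]
    simp [hfb, hfs]
  · rw [if_neg hsmall]
    have hBpred : ∀ k ∈ List.range flt.length,
        (!( (pvSweep flt (PySem.List.sorted (List.range flt.length) (fun k => (PySem.List.pyGet? (flt.getD k ([], 0)).1 0).getD 0) false)
              (List.replicate flt.length false)).getD k false)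
          || decide ((PySem.List.max? (flt.map (fun p => p.2)) (fun y => y)).getD 0 ≤ (flt.getD k ([], 0)).2))
        = (decide ((PySem.List.max? fs (fun y => y)).getD 0 ≤ (flt.getD k ([], 0)).2)
          || !((List.range flt.length).any (fun j => decide (j ≠ k) && pvOv flt k j))) := by
      intro k hkmem
      rw [pvMarked_getD flt k (List.mem_range.mp hkmem), ← hfs, Bool.or_comm]
    rw [← List.filter_congr hBpred]
    simp only [List.nil_append]
    rw [List.map_congr_left (fun k _ => getD_map_fst flt k),
        List.map_congr_left (fun k _ => getD_map_snd flt k)]
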